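-- pv_equiv track=rewrite | github.com/Mahers7/Python_assignments | day09/analyze.py | find_longest_gc_run
-- ===== SOURCE A (Python) =====
-- def find_longest_gc_run(sequence):
--     max_length = 0
--     max_seq = ""
--     current_length = 0
--     current_seq = ""
--
--     for base in sequence:
--         if base in "GCgc":
--             current_length += 1
--             current_seq += base
--         else:
--             if current_length > max_length:
--                 max_length = current_length
--                 max_seq = current_seq
--             current_length = 0
--             current_seq = ""
--
--     if current_length > max_length:
--         max_length = current_length
--         max_seq = current_seq
--
--     return max_seq
-- ===== SOURCE B (Python) =====
-- def find_longest_gc_run(sequence):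
--     best = ""
--     i = 0
--     n = len(sequence)
--     while i < n:
--         if sequence[i] in "GCgc":
--             j = i + 1
--             while j < n and sequence[j] in "GCgc":
--                 j += 1
--             run = sequence[i:j]
--             if len(run) > len(best):
--                 best = run
--             i = j
--         else:
--             i += 1
--     return best
-- ===== Notes on version B (the rewrite author's own statement) =====
-- stated objective: alternative
-- what changed: Replaces A's per-character accumulator (four running variables updated once per base with a trailing flush) by a run-at-a-time scan: each maximal GC run is taken as one slice and compared against the best so far, so there is no pending-run state or post-loop fixup.
import Mathlib
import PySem

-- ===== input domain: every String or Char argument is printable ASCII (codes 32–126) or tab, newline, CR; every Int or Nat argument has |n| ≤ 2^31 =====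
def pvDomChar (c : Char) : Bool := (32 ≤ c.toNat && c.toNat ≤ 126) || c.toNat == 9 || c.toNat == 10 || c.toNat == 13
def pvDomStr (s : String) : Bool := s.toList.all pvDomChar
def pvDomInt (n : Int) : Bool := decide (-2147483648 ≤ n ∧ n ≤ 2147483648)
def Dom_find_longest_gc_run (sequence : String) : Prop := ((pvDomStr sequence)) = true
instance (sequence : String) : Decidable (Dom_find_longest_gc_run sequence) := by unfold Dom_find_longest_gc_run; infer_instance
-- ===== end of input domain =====

-- B replaces A's per-character accumulator state by a run-at-a-time scan (one slice per maximal GC run); alternative decomposition, same result.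

-- ===== PORT A =====
-- `base in "GCgc"` for a single character = character membership
def pvIsGC (c : Char) : Bool := "GCgc".toList.contains c

def find_longest_gc_run (sequence : String) : String :=
  let st := sequence.toList.foldl
    (fun (st : Int × String × Int × String) base =>
      let (maxLength, maxSeq, currentLength, currentSeq) := st
      if pvIsGC base then
        (maxLength, maxSeq, currentLength + 1, currentSeq.push base)
      else
        if currentLength > maxLength then (currentLength, currentSeq, 0, "")
        else (maxLength, maxSeq, 0, ""))
    (0, "", 0, "")
  let (maxLength, maxSeq, currentLength, currentSeq) := st
  if currentLength > maxLength then currentSeq else maxSeq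

-- ===== PORT B =====
-- outer `while s` loop of Source B; the inner j-scan producing the slices s[:j] / s[j:]
-- is takeWhile / dropWhile of the tail
def pvGcLoop (best : String) : List Char → String
  | [] => best
  | c :: rest =>
    if pvIsGC c then
      let run := String.ofList (c :: rest.takeWhile pvIsGC)
      let best' := if run.length > best.length then run else best
      pvGcLoop best' (rest.dropWhile pvIsGC)
    else pvGcLoop best rest
termination_by l => l.length
decreasing_by
  · simp only [List.length_cons]; exact Nat.lt_succ_of_le (List.length_dropWhile_le _ _)
  · simp only [List.length_cons]; exact Nat.lt_succ_of_le (Nat.le_refl _)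

def find_longest_gc_run_alt (sequence : String) : String :=
  pvGcLoop "" sequence.toList

-- ===== PRECONDITION & SPEC =====
def Spec_find_longest_gc_run (sequence : String) (out : String) : Prop := out = find_longest_gc_run_alt sequence
instance (sequence : String) (out : String) : Decidable (Spec_find_longest_gc_run sequence out) := by unfold Spec_find_longest_gc_run; infer_instance

-- ===== CLAIM (what is proved, stated in full; the proofs are below) =====
def Claim_equal_find_longest_gc_run : Prop := ∀ (sequence : String), Dom_find_longest_gc_run sequence → Spec_find_longest_gc_run sequence (find_longest_gc_run sequence)

-- ===== LEMMAS AND PROOFS =====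

-- A's loop + trailing flush, abstracted over the starting state (the two length
-- components are determined by the two string components, which is A's invariant)
def pvALoop (mS cS : String) (l : List Char) : String :=
  let st := l.foldl
    (fun (st : Int × String × Int × String) base =>
      let (maxLength, maxSeq, currentLength, currentSeq) := st
      if pvIsGC base then
        (maxLength, maxSeq, currentLength + 1, currentSeq.push base)
      else
        if currentLength > maxLength then (currentLength, currentSeq, 0, "")
        else (maxLength, maxSeq, 0, ""))
    ((mS.length : Int), mS, (cS.length : Int), cS)
  let (maxLength, maxSeq, currentLength, currentSeq) := st
  if currentLength > maxLength then currentSeq else maxSeq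

-- B's loop with the pending run cS prepended to the leading GC block of l
def pvBPend (mS cS : String) (l : List Char) : String :=
  let run := cS.toList ++ l.takeWhile pvIsGC
  pvGcLoop (if ((run.length : Int) > (mS.length : Int)) then String.ofList run else mS)
    (l.dropWhile pvIsGC)

theorem pvGcLoop_cons_neg (best : String) (c : Char) (rest : List Char)
    (h : ¬ pvIsGC c = true) : pvGcLoop best (c :: rest) = pvGcLoop best rest := by
  rw [pvGcLoop]
  simp [h]

theorem pvBPend_empty (mS : String) (l : List Char) :
    pvBPend mS "" l = pvGcLoop mS l := by
  cases l with
  | nil => simp [pvBPend, pvGcLoop]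
  | cons c rest =>
    by_cases h : pvIsGC c = true
    · rw [pvGcLoop]
      simp [pvBPend, h]
    · rw [pvGcLoop_cons_neg _ _ _ h]
      simp [pvBPend, h, pvGcLoop_cons_neg _ _ _ h]
      rw [if_neg (by omega : ¬((mS.length : Int) < 0))]

theorem pvALoop_eq_pvBPend (l : List Char) : ∀ (mS cS : String),
    pvALoop mS cS l = pvBPend mS cS l := by
  induction l with
  | nil =>
    intro mS cS
    by_cases h : ((cS.length : Int) > (mS.length : Int)) <;>
      simp [pvALoop, pvBPend, pvGcLoop, h]
  | cons c rest ih =>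
    intro mS cS
    by_cases h : pvIsGC c = true
    · have step : pvALoop mS cS (c :: rest) = pvALoop mS (cS.push c) rest := by
        simp [pvALoop, h, String.length_push]
      rw [step, ih]
      simp [pvBPend, h, String.toList_push]
    · have step : pvALoop mS cS (c :: rest) =
          pvALoop (if ((cS.length : Int) > (mS.length : Int)) then cS else mS) "" rest := by
        by_cases hc : ((cS.length : Int) > (mS.length : Int)) <;> simp [pvALoop, h, hc]
      rw [step, ih, pvBPend_empty]
      rw [← pvGcLoop_cons_neg _ c rest h]
      simp [pvBPend, h, String.ofList_toList]

-- ===== VERDICT (by name: the statement is the Claim_ definition above) =====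
theorem find_longest_gc_run_spec : Claim_equal_find_longest_gc_run := by
  intro s _
  show find_longest_gc_run s = find_longest_gc_run_alt s
  have h := pvALoop_eq_pvBPend s.toList "" ""
  rw [pvBPend_empty] at h
  simpa [pvALoop, find_longest_gc_run, find_longest_gc_run_alt] using h
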